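-- pv_equiv track=rewrite | github.com/karina-cherednyk/Information-Retrieval-Model | Cherednyk_07/converter/postings_converter_zone.py | to_vb_zone
-- ===== SOURCE A (Python) =====
-- def to_vb_zone(pair):
--     rank, id = pair
--     res_rank = bin(rank)[2:]
--     res_rank = '0' * (8 - len(res_rank)) + res_rank
--     b_id = bin(id)[2:]
--     vb_str_id = ''
--     leading = '1'
--     while len(b_id) > 7:
--         vb_str_id = leading + b_id[-7:] + vb_str_id
--         b_id = b_id[:-7]
--         leading = '0'
--     vb_str_id = leading + (7 - len(b_id)) * '0' + b_id + vb_str_id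
--     return res_rank + vb_str_id
-- ===== SOURCE B (Python) =====
-- def to_vb_zone(pair):
--     rank, id = pair
--
--     def byte_group(k):
--         chunk = (id >> (7 * k)) & 0x7F
--         lead = '1' if k == 0 else '0'
--         return lead + format(chunk, '07b')
--
--     n_bytes = max(1, (id.bit_length() + 6) // 7)
--     groups = [byte_group(k) for k in range(n_bytes - 1, -1, -1)]
--     return format(rank, '08b') + ''.join(groups)
-- ===== Notes on version B (the rewrite author's own statement) =====
-- stated objective: idiomatic
-- what changed: B drops A's mutating binary-string slicing loop entirely: it computes the byte count from id.bit_length(), extracts each 7-bit group arithmetically with shift-and-mask from high to low, formats rank and chunks with format(...,'0Nb'), and joins the group strings once.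
-- outside the precondition, e.g. on to_vb_zone((-5, 3)): A returns '0000b10110000011', B returns '-000010110000011'; on to_vb_zone((5, -3)): A returns '0000010110000b11', B returns '0000010111111101'
import Mathlib
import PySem

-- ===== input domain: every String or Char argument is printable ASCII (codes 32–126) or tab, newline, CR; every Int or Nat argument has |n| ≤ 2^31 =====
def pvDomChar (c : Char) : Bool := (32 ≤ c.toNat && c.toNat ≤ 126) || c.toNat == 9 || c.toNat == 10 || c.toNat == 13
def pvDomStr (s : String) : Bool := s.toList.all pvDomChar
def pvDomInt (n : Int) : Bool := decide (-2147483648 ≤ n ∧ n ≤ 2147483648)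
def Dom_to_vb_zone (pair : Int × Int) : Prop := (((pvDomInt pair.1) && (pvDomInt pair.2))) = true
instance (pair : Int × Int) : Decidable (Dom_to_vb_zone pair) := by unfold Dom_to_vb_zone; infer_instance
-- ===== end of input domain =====

-- B re-implements A idiomatically: it derives the byte count from id.bit_length() and
-- extracts each 7-bit group arithmetically by shift-and-mask, instead of A's slicing of a
-- mutating binary string; equivalence is proved for nonnegative rank and id (Pre_).

-- ===== PORT A =====
-- A's while-loop with its state (b_id, leading, vb_str_id)
def vbLoop (bId : List Char) (leading : Char) (vb : List Char) : List Char :=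
  if bId.length > 7 then
    -- vb_str_id = leading + b_id[-7:] + vb_str_id ; b_id = b_id[:-7] ; leading = '0'
    -- (b_id[-7:] / b_id[:-7] = drop/take (len-7); exact since len > 7 here)
    vbLoop (bId.take (bId.length - 7)) '0' (leading :: (bId.drop (bId.length - 7) ++ vb))
  else
    -- vb_str_id = leading + (7 - len(b_id)) * '0' + b_id + vb_str_id
    leading :: (List.replicate (7 - bId.length) '0' ++ bId ++ vb)
termination_by bId.length
decreasing_by simp [List.length_take]; omega

def to_vb_zone (pair : Int × Int) : String :=
  let rank := pair.1
  let id := pair.2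
  let res_rank := (PySem.Int.toBinChars0b rank).drop 2        -- bin(rank)[2:] (drop 2 = [2:], exact)
  let res_rank := List.replicate (8 - res_rank.length) '0' ++ res_rank
  let b_id := (PySem.Int.toBinChars0b id).drop 2              -- bin(id)[2:]
  String.ofList (res_rank ++ vbLoop b_id '1' [])

-- ===== PORT B =====
-- format(x, '0{w}b'): zero-pad the binary form to width w, sign first (exact)
def fmt0b (x : Int) (w : Nat) : List Char :=
  let s := PySem.Int.toBinChars x
  if x < 0 then '-' :: (List.replicate (w - s.length) '0' ++ s.drop 1)
  else List.replicate (w - s.length) '0' ++ s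

def byteGroup (id : Int) (k : Nat) : List Char :=
  let chunk := PySem.Int.band (id >>> (7 * k)) 0x7F           -- (id >> (7*k)) & 0x7F
  let lead := if k == 0 then '1' else '0'
  lead :: fmt0b chunk 7

def to_vb_zone_alt (pair : Int × Int) : String :=
  let rank := pair.1
  let id := pair.2
  let nBytes := max 1 ((PySem.Int.bitLength id + 6) / 7)
  -- [byte_group(k) for k in range(n_bytes - 1, -1, -1)]
  let groups := ((List.range nBytes).reverse).map (byteGroup id)
  String.ofList (fmt0b rank 8 ++ groups.flatten)

-- ===== PRECONDITION & SPEC =====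
-- Pre_ excludes negative rank or id: there bin()'s '-0b' prefix makes A's [2:] slice leave a
-- literal 'b' (and drop the sign) inside the output, an accident of string slicing that no
-- binary formatter reproduces; B returns format()'s signed form there.
def Pre_to_vb_zone (pair : Int × Int) : Prop := 0 ≤ pair.1 ∧ 0 ≤ pair.2
instance (pair : Int × Int) : Decidable (Pre_to_vb_zone pair) := by unfold Pre_to_vb_zone; infer_instance
def pvWitness_to_vb_zone : (Int × Int) := (3, 5)

def Spec_to_vb_zone (pair : Int × Int) (out : String) : Prop := out = to_vb_zone_alt pair
instance (pair : Int × Int) (out : String) : Decidable (Spec_to_vb_zone pair out) := by unfold Spec_to_vb_zone; infer_instance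

-- ===== CLAIM (what is proved, stated in full; the proofs are below) =====
def Claim_equal_to_vb_zone : Prop := ∀ (pair : Int × Int), Dom_to_vb_zone pair → Pre_to_vb_zone pair → Spec_to_vb_zone pair (to_vb_zone pair)

-- ===== LEMMAS AND PROOFS =====

-- MSB-first binary digits of n, with rep 0 = ['0'] (what Nat.toDigits 2 computes)
def rep (n : Nat) : List Char :=
  if n / 2 = 0 then [Nat.digitChar (n % 2)]
  else rep (n / 2) ++ [Nat.digitChar (n % 2)]
termination_by n
decreasing_by omega

-- fixed-width k-bit binary of r, MSB first
def fixedBits : Nat → Nat → List Char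
  | 0, _ => []
  | k + 1, r => fixedBits k (r / 2) ++ [Nat.digitChar (r % 2)]

-- the canonical VB encoding both loops compute
def encA (n : Nat) (lead : Char) : List Char :=
  if n < 128 then lead :: fixedBits 7 n
  else encA (n / 128) '0' ++ (lead :: fixedBits 7 (n % 128))
termination_by n
decreasing_by exact Nat.div_lt_self (by omega) (by omega)

def mB (n : Nat) : Nat := max 1 ((PySem.Int.bitLength (n : Int) + 6) / 7)

lemma rep_ne_nil (n : Nat) : rep n ≠ [] := by
  rw [rep]; split <;> simp

lemma rep_zero : rep 0 = ['0'] := by rw [rep]; rfl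

lemma rep_one : rep 1 = ['1'] := by rw [rep]; rfl

lemma fixedBits_length (k : Nat) : ∀ r, (fixedBits k r).length = k := by
  induction k with
  | zero => intro r; rfl
  | succ k ih => intro r; simp [fixedBits, ih]

lemma rep_split (k : Nat) : ∀ q r, 1 ≤ q → r < 2 ^ k →
    rep (q * 2 ^ k + r) = rep q ++ fixedBits k r := by
  induction k with
  | zero =>
    intro q r hq hr
    interval_cases r
    simp [fixedBits]
  | succ k ih =>
    intro q r hq hr
    have hb : 1 ≤ q * 2 ^ k := Nat.one_le_iff_ne_zero.mpr (by positivity)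
    have hrk : r / 2 < 2 ^ k := by rw [pow_succ] at hr; omega
    have e : q * 2 ^ (k + 1) + r = (q * 2 ^ k) * 2 + r := by rw [pow_succ]; ring
    rw [e, rep]
    have hne : ¬ ((q * 2 ^ k) * 2 + r) / 2 = 0 := by omega
    rw [if_neg hne]
    have hd : ((q * 2 ^ k) * 2 + r) / 2 = q * 2 ^ k + r / 2 := by omega
    have hm : ((q * 2 ^ k) * 2 + r) % 2 = r % 2 := by omega
    rw [hd, hm, ih q (r / 2) hq hrk, fixedBits]
    simp

lemma fixedBits_eq_pad (k : Nat) : ∀ r, 1 ≤ k → r < 2 ^ k →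
    fixedBits k r = List.replicate (k - (rep r).length) '0' ++ rep r := by
  induction k with
  | zero => intro r h; omega
  | succ k ih =>
    intro r _ hr
    by_cases hk : k = 0
    · subst hk
      interval_cases r <;> simp [fixedBits, rep_zero, rep_one] <;> rfl
    · have hr2 : r / 2 < 2 ^ k := by rw [pow_succ] at hr; omega
      rw [fixedBits, ih (r / 2) (by omega) hr2]
      by_cases h2 : r / 2 = 0
      · have hrep : rep r = [Nat.digitChar (r % 2)] := by rw [rep, if_pos h2]
        rw [h2, rep_zero, hrep]
        simp only [List.length_cons, List.length_nil]
        rw [List.append_assoc]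
        have : List.replicate (k - 1) '0' ++ (['0'] ++ [Nat.digitChar (r % 2)])
             = (List.replicate (k - 1) '0' ++ ['0']) ++ [Nat.digitChar (r % 2)] := by simp
        rw [this, ← List.replicate_succ' (n := k - 1)]
        have hk1 : k - 1 + 1 = k := by omega
        rw [hk1]
        simp
      · have hrep : rep r = rep (r / 2) ++ [Nat.digitChar (r % 2)] := by rw [rep, if_neg h2]
        have hlen : 1 ≤ (rep (r / 2)).length := List.length_pos_iff.mpr (rep_ne_nil _)
        rw [hrep]
        simp only [List.length_append, List.length_cons, List.length_nil]
        have : k + 1 - ((rep (r / 2)).length + 1) = k - (rep (r / 2)).length := by omega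
        rw [this]
        simp

lemma rep_length_le (k n : Nat) (hk : 1 ≤ k) (h : n < 2 ^ k) : (rep n).length ≤ k := by
  have := fixedBits_eq_pad k n hk h
  have hl := fixedBits_length k n
  rw [this] at hl
  simp at hl
  omega

lemma toDigitsCore_two_eq (f : Nat) : ∀ n ds, n < f →
    Nat.toDigitsCore 2 f n ds = rep n ++ ds := by
  induction f with
  | zero => intro n ds h; omega
  | succ f ih =>
    intro n ds h
    rw [Nat.toDigitsCore]
    by_cases h2 : n / 2 = 0
    · simp only [h2]
      rw [rep, if_pos h2]
      rfl
    · simp only [h2, if_false]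
      rw [ih _ _ (by omega)]
      conv_rhs => rw [rep, if_neg h2]
      simp

lemma toDigits_two_eq (n : Nat) : Nat.toDigits 2 n = rep n := by
  rw [Nat.toDigits, toDigitsCore_two_eq _ _ _ (by omega)]; simp

lemma vbLoop_eq_encA (n : Nat) : ∀ lead vb, vbLoop (rep n) lead vb = encA n lead ++ vb := by
  induction n using Nat.strong_induction_on with
  | _ n ih =>
    intro lead vb
    by_cases h : n < 128
    · have hlen : (rep n).length ≤ 7 := rep_length_le 7 n (by omega) (by omega)
      rw [vbLoop, if_neg (by omega), encA, if_pos h,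
          fixedBits_eq_pad 7 n (by omega) (by omega)]
      simp
    · have hq : 1 ≤ n / 128 := by omega
      have hsplit : rep n = rep (n / 128) ++ fixedBits 7 (n % 128) := by
        have : n = (n / 128) * 2 ^ 7 + n % 128 := by omega
        conv_lhs => rw [this]
        exact rep_split 7 (n / 128) (n % 128) hq (by omega)
      have hlq : 1 ≤ (rep (n / 128)).length := List.length_pos_iff.mpr (rep_ne_nil _)
      have hlen : (rep n).length = (rep (n / 128)).length + 7 := by
        rw [hsplit]; simp [fixedBits_length]
      rw [vbLoop, if_pos (by omega), hlen]
      have h7 : (rep (n / 128)).length + 7 - 7 = (rep (n / 128)).length := by omega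
      rw [h7, hsplit, List.take_left' rfl, List.drop_left' rfl,
          ih (n / 128) (Nat.div_lt_self (by omega) (by omega)) '0' _]
      conv_rhs => rw [encA, if_neg h]
      simp

lemma bitLength_le_seven (n : Nat) (h : n < 128) : PySem.Int.bitLength (n : Int) ≤ 7 := by
  by_contra hc
  rcases Nat.eq_zero_or_pos n with h0 | h0
  · subst h0; simp [PySem.Int.bitLength_zero] at hc
  · have hne : (n : Int) ≠ 0 := by omega
    have := PySem.Int.two_pow_bitLength_le (n : Int) hne
    have h8 : 8 ≤ PySem.Int.bitLength (n : Int) := by omega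
    have : (2 : Nat) ^ 7 ≤ 2 ^ (PySem.Int.bitLength (n : Int) - 1) :=
      Nat.pow_le_pow_right (by omega) (by omega)
    simp only [Int.natAbs_natCast] at *
    omega

lemma bitLength_pos (n : Nat) (h : 1 ≤ n) : 1 ≤ PySem.Int.bitLength (n : Int) := by
  by_contra hc
  have := PySem.Int.lt_two_pow_bitLength (n : Int)
  simp only [Int.natAbs_natCast] at this
  have h0 : PySem.Int.bitLength (n : Int) = 0 := by omega
  rw [h0] at this
  simp at this
  omega

lemma bitLength_div128 (n : Nat) (h : 128 ≤ n) :
    PySem.Int.bitLength (n : Int) = PySem.Int.bitLength ((n / 128 : Nat) : Int) + 7 := by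
  have e1 := PySem.Int.bitLength_natCast (m := n) (by omega)
  have e2 := PySem.Int.bitLength_natCast (m := n / 2) (by omega)
  have e3 := PySem.Int.bitLength_natCast (m := n / 2 / 2) (by omega)
  have e4 := PySem.Int.bitLength_natCast (m := n / 2 / 2 / 2) (by omega)
  have e5 := PySem.Int.bitLength_natCast (m := n / 2 / 2 / 2 / 2) (by omega)
  have e6 := PySem.Int.bitLength_natCast (m := n / 2 / 2 / 2 / 2 / 2) (by omega)
  have e7 := PySem.Int.bitLength_natCast (m := n / 2 / 2 / 2 / 2 / 2 / 2) (by omega)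
  have e128 : n / 2 / 2 / 2 / 2 / 2 / 2 / 2 = n / 128 := by omega
  rw [e1, e2, e3, e4, e5, e6, e7, e128]

lemma mB_small (n : Nat) (h : n < 128) : mB n = 1 := by
  have := bitLength_le_seven n h
  unfold mB
  omega

lemma mB_big (n : Nat) (h : 128 ≤ n) : mB n = mB (n / 128) + 1 := by
  have h1 := bitLength_div128 n h
  have h2 := bitLength_pos (n / 128) (by omega)
  unfold mB
  omega

lemma groups_eq_encA (n : Nat) : ∀ lead,
    (((List.range (mB n)).reverse).map
      (fun k => (if k == 0 then lead else '0') :: fixedBits 7 (n / 2 ^ (7 * k) % 128))).flatten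
    = encA n lead := by
  induction n using Nat.strong_induction_on with
  | _ n ih =>
    intro lead
    by_cases h : n < 128
    · rw [mB_small n h, encA, if_pos h]
      simp [Nat.mod_eq_of_lt h]
    · rw [mB_big n (by omega), List.range_succ_eq_map]
      simp only [List.reverse_cons, List.map_append, List.map_map, List.flatten_append,
        List.map_reverse]
      have hfun : ∀ k : Nat,
          ((fun k => (if k == 0 then lead else '0') :: fixedBits 7 (n / 2 ^ (7 * k) % 128)) ∘
            Nat.succ) k
          = (fun k => (if k == 0 then '0' else '0') ::
              fixedBits 7 ((n / 128) / 2 ^ (7 * k) % 128)) k := by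
        intro k
        simp only [Function.comp_apply, Nat.succ_eq_add_one]
        have : n / 2 ^ (7 * (k + 1)) = (n / 128) / 2 ^ (7 * k) := by
          rw [Nat.div_div_eq_div_mul]
          congr 1
          rw [show (128 : Nat) = 2 ^ 7 from rfl, ← pow_add]
          ring_nf
        rw [this]
        simp
      rw [List.map_congr_left (fun a _ => hfun a), ← List.map_reverse,
          ih (n / 128) (Nat.div_lt_self (by omega) (by omega)) '0']
      conv_rhs => rw [encA, if_neg h]
      simp

lemma natCast_shiftRight (n m : Nat) : ((n : Int) >>> m) = ((n >>> m : Nat) : Int) :=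
  Int.mem_toNat?.mp rfl

lemma fmt0b_nat (c w : Nat) :
    fmt0b (c : Int) w = List.replicate (w - (rep c).length) '0' ++ rep c := by
  unfold fmt0b PySem.Int.toBinChars
  rw [if_neg (by omega), if_neg (by omega), Int.toNat_natCast, toDigits_two_eq]

lemma byteGroup_eq (n k : Nat) :
    byteGroup (n : Int) k
      = (if k == 0 then '1' else '0') :: fixedBits 7 (n / 2 ^ (7 * k) % 128) := by
  unfold byteGroup
  rw [natCast_shiftRight]
  have hband : PySem.Int.band ((n >>> (7 * k) : Nat) : Int) 0x7F
      = (((n >>> (7 * k)) &&& 127 : Nat) : Int) := by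
    have := PySem.Int.band_natCast (n >>> (7 * k)) 127
    simpa using this
  rw [hband]
  have hmod : (n >>> (7 * k)) &&& 127 = n / 2 ^ (7 * k) % 128 := by
    rw [Nat.shiftRight_eq_div_pow]
    exact Nat.and_two_pow_sub_one_eq_mod _ 7
  rw [hmod]
  show (if k == 0 then '1' else '0')
      :: fmt0b ((n / 2 ^ (7 * k) % 128 : Nat) : Int) 7 = _
  rw [fmt0b_nat, ← fixedBits_eq_pad 7 _ (by omega) (by omega)]

lemma bin_drop2_nat (n : Nat) : (PySem.Int.toBinChars0b (n : Int)).drop 2 = rep n := by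
  unfold PySem.Int.toBinChars0b
  rw [if_neg (by omega), Int.toNat_natCast, toDigits_two_eq]
  rfl

lemma main_eq (pair : Int × Int) (h1 : 0 ≤ pair.1) (h2 : 0 ≤ pair.2) :
    to_vb_zone pair = to_vb_zone_alt pair := by
  obtain ⟨rank, id⟩ := pair
  simp only at h1 h2
  obtain ⟨r, rfl⟩ : ∃ r : Nat, rank = (r : Int) := ⟨rank.toNat, (Int.toNat_of_nonneg h1).symm⟩
  obtain ⟨n, rfl⟩ : ∃ m : Nat, id = (m : Int) := ⟨id.toNat, (Int.toNat_of_nonneg h2).symm⟩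
  show String.ofList _ = String.ofList _
  rw [bin_drop2_nat, bin_drop2_nat, fmt0b_nat]
  congr 1
  congr 1
  have hmap : ((List.range (max 1 ((PySem.Int.bitLength (n : Int) + 6) / 7))).reverse).map
        (byteGroup (n : Int))
      = ((List.range (mB n)).reverse).map
        (fun k => (if k == 0 then '1' else '0') :: fixedBits 7 (n / 2 ^ (7 * k) % 128)) :=
    List.map_congr_left (fun a _ => byteGroup_eq n a)
  rw [hmap, groups_eq_encA n '1', vbLoop_eq_encA n '1' []]
  simp

-- ===== VERDICT (by name: the statement is the Claim_ definition above) =====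
theorem to_vb_zone_spec : Claim_equal_to_vb_zone := by
  intro pair _ hpre
  exact main_eq pair hpre.1 hpre.2
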